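-- pv_equiv track=rewrite | github.com/Loofy147/Global-theorem- | core.py | _build_sa
-- ===== SOURCE A (Python) =====
-- from itertools import permutations, product as iprod
-- from itertools import permutations, product as iprod
--
-- def _build_sa(m: int, k: int=3):
--     n = m**k
--     arc_s = [[0]*k for _ in range(n)]
--     m_pow = [m**i for i in range(k)]
--     m_pow.reverse()
--     for idx in range(n):
--         for c in range(k):
--             if (idx // m_pow[c]) % m == m - 1:
--                 arc_s[idx][c] = idx - (m - 1) * m_pow[c]
--             else:
--                 arc_s[idx][c] = idx + m_pow[c]
--     all_p = [list(p) for p in permutations(range(k))]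
--     pa = [[None]*k for _ in range(len(all_p))]
--     for pi,p in enumerate(all_p):
--         for at,c in enumerate(p): pa[pi][c] = at
--     return n, arc_s, pa, all_p
-- ===== SOURCE B (Python) =====
-- from itertools import permutations
--
-- def _build_sa(m: int, k: int = 3):
--     # Build the arc table bottom-up by block replication: the (j+1)-digit table
--     # is m offset copies of the j-digit table, each with a new leading-digit
--     # column prepended; no per-state digit extraction is done at all.
--     arc_s = [[]]
--     size = 1
--     for _ in range(k):
--         new = []
--         for d in range(m):
--             off = d * size
--             lead = ((d + 1) % m) * size
--             for r, row in enumerate(arc_s):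
--                 new.append([lead + r] + [off + x for x in row])
--         arc_s = new
--         size *= m
--     all_p = [list(p) for p in permutations(range(k))]
--     # inverse permutation = argsort of p
--     pa = [sorted(range(k), key=p.__getitem__) for p in all_p]
--     return size, arc_s, pa, all_p
-- ===== Notes on version B (the rewrite author's own statement) =====
-- stated objective: alternative
-- what changed: B never extracts digits: it builds the arc table bottom-up by block replication (the (j+1)-digit table is m offset copies of the j-digit table with a new leading-digit column prepended), and builds each permutation inverse as an argsort, sorted(range(k), key=p.__getitem__), instead of A's per-index div/mod arithmetic and enumerate-assignment fill.
-- intended difference: For m < 0 with positive even k (a nonsensical negative alphabet size for which m**k happens to be positive), A returns an arc table built from negative-base floor-division arithmetic while B returns the empty arc table (no blocks to replicate), the sensible value for a negative alphabet. — e.g. on _build_sa(-1, 2): A returns (1, [[-1, 1]], [[0, 1], [1, 0]], [[0, 1], [1, 0]]), B returns (1, [], [[0, 1], [1, 0]], [[0, 1], [1, 0]])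
import Mathlib
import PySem

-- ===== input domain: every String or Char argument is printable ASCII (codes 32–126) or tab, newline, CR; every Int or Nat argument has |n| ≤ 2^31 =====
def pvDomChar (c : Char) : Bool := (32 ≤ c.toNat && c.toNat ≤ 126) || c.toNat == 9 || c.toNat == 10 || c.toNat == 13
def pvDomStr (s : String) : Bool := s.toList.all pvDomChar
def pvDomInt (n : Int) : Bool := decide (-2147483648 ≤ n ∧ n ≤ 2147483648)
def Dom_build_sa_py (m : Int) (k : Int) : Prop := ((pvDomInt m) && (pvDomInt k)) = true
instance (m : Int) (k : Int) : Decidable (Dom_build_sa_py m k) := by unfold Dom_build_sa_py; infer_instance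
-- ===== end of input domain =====

-- B builds the arc table bottom-up by block replication (the (j+1)-digit table is m offset
-- copies of the j-digit table with a new leading column) and the inverse permutations by
-- argsort (sorted(range(k), key=p.__getitem__)) — a different construction, same cost.


-- ===== PORT A =====
-- literal transliteration of A; pa's [None]*k initial row is rendered as replicate 0
-- (every slot is overwritten before the row is read, since p is a permutation of range(k))
def build_sa_py (m : Int) (k : Int) : Int × List (List Int) × List (List Int) × List (List Int) :=
  let n : Int := m ^ k.toNat
  let m_pow : List Int := ((List.range k.toNat).map (fun i => m ^ i)).reverse
  let arc_s : List (List Int) :=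
    (PySem.List.pyRange 0 n 1).map (fun idx =>
      (List.range k.toNat).map (fun c =>
        let w := m_pow.getD c 0
        if PySem.Int.mod (PySem.Int.floordiv idx w) m = m - 1 then
          idx - (m - 1) * w
        else
          idx + w))
  let all_p : List (List Int) :=
    PySem.List.permutations ((List.range k.toNat).map (fun (i : Nat) => (i : Int))) k.toNat
  let pa : List (List Int) :=
    all_p.map (fun p =>
      (PySem.List.enumerate p 0).foldl (fun acc pr => acc.set pr.2.toNat pr.1)
        (List.replicate k.toNat 0))
  (n, arc_s, pa, all_p)

-- ===== PORT B =====
-- B's loop body: one replication level — m offset copies of the current table, a new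
-- leading-digit column prepended to every row.
def pvStep (m : Int) (st : List (List Int) × Int) : List (List Int) × Int :=
  let new := (PySem.List.pyRange 0 m 1).flatMap (fun d =>
    let off := d * st.2
    let lead := PySem.Int.mod (d + 1) m * st.2
    (PySem.List.enumerate st.1 0).map (fun pr => (lead + pr.1) :: pr.2.map (fun x => off + x)))
  (new, st.2 * m)

def build_sa_py_alt (m : Int) (k : Int) : Int × List (List Int) × List (List Int) × List (List Int) :=
  let st := (List.range k.toNat).foldl (fun st _ => pvStep m st) ([[]], 1)
  let all_p : List (List Int) :=
    PySem.List.permutations ((List.range k.toNat).map (fun (i : Nat) => (i : Int))) k.toNat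
  let pa : List (List Int) :=
    all_p.map (fun p =>
      PySem.List.sorted (PySem.List.pyRange 0 (PySem.List.len p) 1)
        (fun i => PySem.List.pyGetD p i 0) false)
  (st.2, st.1, pa, all_p)

-- ===== PRECONDITION & SPEC =====
-- Pre_ excludes exactly the inputs k < 0, on which A raises (m**k is a float, so range(n)
-- raises TypeError; for m = 0 it is a ZeroDivisionError).
def Pre_build_sa_py (m : Int) (k : Int) : Prop := 0 ≤ k
instance (m : Int) (k : Int) : Decidable (Pre_build_sa_py m k) := by unfold Pre_build_sa_py; infer_instance
def pvWitness_build_sa_py : Int × Int := (2, 2)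

-- For m < 0 with positive even k (a nonsensical negative alphabet size for which m**k happens
-- to be positive), A returns an arc table built from negative-base floor-division arithmetic,
-- while B returns the empty arc table (there are no digit blocks to replicate), the sensible
-- value for a negative alphabet.
def D_build_sa_py (m : Int) (k : Int) : Prop := m < 0 ∧ 0 < k ∧ k % 2 = 0
instance (m : Int) (k : Int) : Decidable (D_build_sa_py m k) := by unfold D_build_sa_py; infer_instance

def Spec_build_sa_py (m : Int) (k : Int) (out : Int × List (List Int) × List (List Int) × List (List Int)) : Prop := ¬ D_build_sa_py m k → out = build_sa_py_alt m k
instance (m : Int) (k : Int) (out : Int × List (List Int) × List (List Int) × List (List Int)) : Decidable (Spec_build_sa_py m k out) := by unfold Spec_build_sa_py; infer_instance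

def pvDiffWitness_build_sa_py : Int × Int := (-1, 2)
def pvDiffWitnessOut_build_sa_py : (Int × List (List Int) × List (List Int) × List (List Int)) × (Int × List (List Int) × List (List Int) × List (List Int)) :=
  ((1, [[-1, 1]], [[0, 1], [1, 0]], [[0, 1], [1, 0]]),
   (1, [], [[0, 1], [1, 0]], [[0, 1], [1, 0]]))

-- ===== CLAIM (what is proved, stated in full; the proofs are below) =====
def Claim_unchanged_build_sa_py : Prop := ∀ (m : Int) (k : Int), Dom_build_sa_py m k → Pre_build_sa_py m k → Spec_build_sa_py m k (build_sa_py m k)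
def Claim_changed_build_sa_py : Prop := Dom_build_sa_py (pvDiffWitness_build_sa_py.1) (pvDiffWitness_build_sa_py.2) ∧ Pre_build_sa_py (pvDiffWitness_build_sa_py.1) (pvDiffWitness_build_sa_py.2) ∧ D_build_sa_py (pvDiffWitness_build_sa_py.1) (pvDiffWitness_build_sa_py.2) ∧ build_sa_py (pvDiffWitness_build_sa_py.1) (pvDiffWitness_build_sa_py.2) = pvDiffWitnessOut_build_sa_py.1 ∧ build_sa_py_alt (pvDiffWitness_build_sa_py.1) (pvDiffWitness_build_sa_py.2) = pvDiffWitnessOut_build_sa_py.2 ∧ pvDiffWitnessOut_build_sa_py.1 ≠ pvDiffWitnessOut_build_sa_py.2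
def Claim_exact_build_sa_py : Prop := ∀ (m : Int) (k : Int), Dom_build_sa_py m k → Pre_build_sa_py m k → D_build_sa_py m k → build_sa_py m k ≠ build_sa_py_alt m k

-- ===== LEMMAS AND PROOFS =====

-- A's row for index idx, with the digit arithmetic in Nat (valid for 0 < M)
def rowA (M K idx : Nat) : List Int :=
  (List.range K).map (fun c =>
    if (idx / M ^ (K - 1 - c)) % M = M - 1 then
      (idx : Int) - ((M : Int) - 1) * (M : Int) ^ (K - 1 - c)
    else
      (idx : Int) + (M : Int) ^ (K - 1 - c))

theorem weights_eq (m : Int) (K : Nat) :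
    ((List.range K).map (fun i => m ^ i)).reverse = (List.range K).map (fun i => m ^ (K - 1 - i)) := by
  apply List.ext_getElem
  · simp
  · intro c h1 h2
    simp only [List.getElem_reverse, List.getElem_map, List.getElem_range, List.length_map,
      List.length_range] at *

theorem getD_map_range' (f : Nat → Int) (K c : Nat) (hc : c < K) :
    (((List.range K).map f).getD c 0) = f c := by
  rw [List.getD_eq_getElem _ _ (by simpa using hc)]
  simp

theorem range_mul_flatMap (a b : Nat) (f : Nat → List Int) :
    (List.range (a * b)).map f =
      (List.range a).flatMap (fun d => (List.range b).map (fun j => f (d * b + j))) := by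
  induction a with
  | zero => simp
  | succ a ih =>
      rw [Nat.succ_mul, List.range_add, List.map_append, ih, List.range_succ,
        List.flatMap_append]
      simp [List.map_map, Function.comp]

-- A's arc table is the rowA table (for nonnegative base M)
theorem A_arc_eq (M K : Nat) (hM : 0 < M) :
    (PySem.List.pyRange 0 (((M : Nat) : Int) ^ K) 1).map (fun idx =>
      (List.range K).map (fun c =>
        let w := (((List.range K).map (fun (i : Nat) => ((M : Int)) ^ i)).reverse).getD c 0
        if PySem.Int.mod (PySem.Int.floordiv idx w) (M : Int) = (M : Int) - 1 then
          idx - ((M : Int) - 1) * w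
        else
          idx + w))
    = (List.range (M ^ K)).map (rowA M K) := by
  rw [weights_eq, ← Nat.cast_pow, PySem.List.pyRange_zero_nat, List.map_map]
  apply List.map_congr_left
  intro idx _
  simp only [Function.comp_apply]
  unfold rowA
  apply List.map_congr_left
  intro c hc
  have hc' : c < K := List.mem_range.mp hc
  rw [getD_map_range' _ K c hc']
  set e := K - 1 - c with hedef
  have hcast : ((M : Int)) ^ e = ((M ^ e : Nat) : Int) := by push_cast; ring
  have hfd : PySem.Int.floordiv (idx : Int) (((M : Nat) : Int) ^ e) = ((idx / M ^ e : Nat) : Int) := by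
    rw [hcast]; exact_mod_cast PySem.Int.floordiv_natCast idx (M ^ e)
  have hmd : PySem.Int.mod ((idx / M ^ e : Nat) : Int) (M : Int) = (((idx / M ^ e) % M : Nat) : Int) := by
    exact_mod_cast PySem.Int.mod_natCast (idx / M ^ e) M
  rw [hfd, hmd]
  by_cases hcond : (idx / M ^ e) % M = M - 1
  · rw [if_pos (by omega), if_pos hcond]
  · rw [if_neg (by omega), if_neg hcond]

-- the replication step on rows: B's new row at index d*M^j + r
theorem rowA_cons (M j d r : Nat) (hM : 0 < M) (hd : d < M) (hr : r < M ^ j) :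
    rowA M (j + 1) (d * M ^ j + r) =
      (PySem.Int.mod ((d : Int) + 1) (M : Int) * (M : Int) ^ j + (r : Int)) ::
        (rowA M j r).map (fun x => (d : Int) * (M : Int) ^ j + x) := by
  have hpow : 0 < M ^ j := Nat.pow_pos hM
  unfold rowA
  rw [List.range_succ_eq_map]
  simp only [List.map_cons, List.map_map]
  congr 1
  · -- head: the new leading-digit column
    have hdiv : (d * M ^ j + r) / M ^ (j + 1 - 1 - 0) = d := by
      simp only [Nat.add_sub_cancel, Nat.sub_zero]
      rw [Nat.add_comm, Nat.add_mul_div_right _ _ hpow, Nat.div_eq_of_lt hr]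
      omega
    have hmod2 : PySem.Int.mod ((d : Int) + 1) (M : Int) = (((d + 1) % M : Nat) : Int) := by
      have : ((d : Int) + 1) = ((d + 1 : Nat) : Int) := by push_cast; ring
      rw [this]; exact_mod_cast PySem.Int.mod_natCast (d + 1) M
    rw [hdiv, Nat.mod_eq_of_lt hd, hmod2]
    by_cases hcase : d = M - 1
    · have hm0 : (d + 1) % M = 0 := by
        have : d + 1 = M := by omega
        rw [this, Nat.mod_self]
      rw [if_pos hcase, hm0]
      have he : j + 1 - 1 - 0 = j := by omega
      rw [he]
      push_cast
      have : (d : Int) = (M : Int) - 1 := by omega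
      rw [this]; ring
    · have hm1 : (d + 1) % M = d + 1 := Nat.mod_eq_of_lt (by omega)
      rw [if_neg hcase, hm1]
      have he : j + 1 - 1 - 0 = j := by omega
      rw [he]
      push_cast; ring
  · -- tail: the old columns, offset by d*M^j
    apply List.map_congr_left
    intro c hc
    have hcj : c < j := List.mem_range.mp hc
    simp only [Function.comp_apply]
    have he : j + 1 - 1 - Nat.succ c = j - 1 - c := by omega
    rw [he]
    set e := j - 1 - c with hedef
    have hej : e + 1 ≤ j := by omega
    have hsplit : M ^ j = M ^ (j - e) * M ^ e := by rw [← pow_add]; congr 1; omega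
    have hdiv : (d * M ^ j + r) / M ^ e = d * M ^ (j - e) + r / M ^ e := by
      rw [hsplit, ← Nat.mul_assoc, Nat.add_comm, Nat.add_mul_div_right _ _ (Nat.pow_pos hM),
        Nat.add_comm]
    have hmul : d * M ^ (j - e) = d * M ^ (j - e - 1) * M := by
      rw [Nat.mul_assoc, ← pow_succ]
      congr 2
      omega
    have hcond : (d * M ^ j + r) / M ^ e % M = r / M ^ e % M := by
      rw [hdiv, hmul, Nat.add_comm, Nat.add_mul_mod_self_right]
    rw [hcond]
    by_cases hcase : r / M ^ e % M = M - 1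
    · rw [if_pos hcase, if_pos hcase]; push_cast; ring
    · rw [if_neg hcase, if_neg hcase]; push_cast; ring

theorem enumerate_map_range (N : Nat) (f : Nat → List Int) :
    PySem.List.enumerate ((List.range N).map f) 0 =
      (List.range N).map (fun (r : Nat) => ((r : Int), f r)) := by
  induction N with
  | zero => simp [PySem.List.enumerate_nil]
  | succ N ih =>
      rw [List.range_succ, List.map_append, List.map_append,
        PySem.List.enumerate_append, ih]
      simp [PySem.List.enumerate_cons, PySem.List.enumerate_nil]

-- inner-fold invariant: after j replication levels the state is the rowA table for j digits
theorem fold_inv (M : Nat) (hM : 0 < M) : ∀ j : Nat,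
    (List.range j).foldl (fun st _ => pvStep (M : Int) st) ([[]], 1) =
      ((List.range (M ^ j)).map (rowA M j), ((M : Nat) : Int) ^ j) := by
  intro j
  induction j with
  | zero => simp [rowA]
  | succ j ih =>
      rw [List.range_succ, List.foldl_append, ih]
      simp only [List.foldl_cons, List.foldl_nil]
      unfold pvStep
      simp only
      refine congrArg₂ Prod.mk ?_ (by rw [← pow_succ])
      rw [enumerate_map_range, PySem.List.pyRange_zero_nat, List.flatMap_map,
        pow_succ, Nat.mul_comm, range_mul_flatMap M (M ^ j) (rowA M (j + 1))]
      apply List.flatMap_congr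
      intro d hd
      simp only [List.map_map]
      apply List.map_congr_left
      intro r hr
      simp only [Function.comp_apply]
      exact (rowA_cons M j d r hM (List.mem_range.mp hd) (List.mem_range.mp hr)).symm

-- the second fold component is m^j for every m
theorem fold_snd (m : Int) : ∀ (j : Nat) (st : List (List Int) × Int),
    ((List.range j).foldl (fun st _ => pvStep m st) st).2 = st.2 * m ^ j := by
  intro j
  induction j with
  | zero => intro st; simp
  | succ j ih =>
      intro st
      rw [List.range_succ, List.foldl_append]
      simp only [List.foldl_cons, List.foldl_nil]
      have hstep : ∀ s : List (List Int) × Int, (pvStep m s).2 = s.2 * m := fun s => rfl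
      rw [hstep, ih st, pow_succ]; ring

theorem fold_fst_nil (m : Int) (hm : m ≤ 0) (j : Nat) (hj : 0 < j) (st : List (List Int) × Int) :
    ((List.range j).foldl (fun st _ => pvStep m st) st).1 = [] := by
  obtain ⟨j', rfl⟩ : ∃ j', j = j' + 1 := ⟨j - 1, by omega⟩
  rw [List.range_succ, List.foldl_append]
  simp only [List.foldl_cons, List.foldl_nil]
  unfold pvStep
  simp only
  rw [PySem.List.pyRange_one_eq_nil (by omega)]
  rfl

-- pa side ---------------------------------------------------------------

theorem foldl_set_length : ∀ (l : List (Int × Int)) (acc : List Int),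
    (l.foldl (fun a pr => a.set pr.2.toNat pr.1) acc).length = acc.length := by
  intro l
  induction l with
  | nil => intro acc; rfl
  | cons p l ih => intro acc; rw [List.foldl_cons, ih]; simp

theorem foldl_set_getD : ∀ (p : List Int), p.Nodup → (∀ x ∈ p, 0 ≤ x) →
    ∀ (s : Int) (acc : List Int) (j : Nat), j < acc.length →
    ((PySem.List.enumerate p s).foldl (fun a pr => a.set pr.2.toNat pr.1) acc).getD j 0 =
      (match PySem.List.index? p (j : Int) with
       | some i => s + (i : Int)
       | none => acc.getD j 0) := by
  intro p
  induction p with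
  | nil =>
      intro _ _ s acc j hj
      rw [PySem.List.enumerate_nil]
      rw [PySem.List.index?_eq_idxOf?]
      rfl
  | cons c rest ih =>
      intro hnd hnn s acc j hj
      rw [PySem.List.enumerate_cons, List.foldl_cons]
      have hnd' : rest.Nodup := (List.nodup_cons.mp hnd).2
      have hnn' : ∀ x ∈ rest, 0 ≤ x := fun x hx => hnn x (List.mem_cons_of_mem _ hx)
      have hlen : j < (acc.set c.toNat s).length := by simpa using hj
      by_cases hcj : c = (j : Int)
      · have hcn : c.toNat = j := by
          have := hnn c (List.mem_cons_self)
          omega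
        rw [ih hnd' hnn' (s + 1) _ j hlen]
        have hcr : c ∉ rest := (List.nodup_cons.mp hnd).1
        have hnone : PySem.List.index? rest (j : Int) = none := by
          rw [PySem.List.index?_eq_none_iff]
          rw [← hcj]
          exact hcr
        rw [hnone, hcj, PySem.List.index?_cons_self]
        simp only [Int.toNat_natCast]
        rw [List.getD_eq_getElem _ _ (by simpa using hj), List.getElem_set_self (by simpa using hj)]
        simp
      · have hset : (acc.set c.toNat s).getD j 0 = acc.getD j 0 := by
          by_cases hcl : c.toNat < acc.length
          · have hne : c.toNat ≠ j := by
              intro h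
              apply hcj
              have := hnn c (List.mem_cons_self)
              omega
            rw [List.getD_eq_getElem _ _ hlen, List.getD_eq_getElem _ _ hj]
            rw [List.getElem_set_ne (by omega)]
          · rw [List.set_eq_of_length_le (by omega)]
        rw [ih hnd' hnn' (s + 1) _ j hlen,
          PySem.List.index?_cons_of_ne rest hcj]
        cases hix : PySem.List.index? rest (j : Int) with
        | none => exact hset
        | some i =>
            simp only [Option.map_some]
            push_cast
            ring

theorem pa_row (K : Nat) (p : List Int)
    (hp : p ∈ PySem.List.permutations ((List.range K).map (fun (i : Nat) => (i : Int))) K) :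
    (PySem.List.enumerate p 0).foldl (fun acc pr => acc.set pr.2.toNat pr.1) (List.replicate K 0)
      = (List.range K).map (fun (c : Nat) => (((PySem.List.index? p (c : Int)).getD 0 : Nat) : Int)) := by
  have hlx : ((List.range K).map (fun (i : Nat) => (i : Int))).length = K := by simp
  have hperm : p.Perm ((List.range K).map (fun (i : Nat) => (i : Int))) := by
    apply PySem.List.perm_of_mem_permutations
    rwa [hlx]
  have hxsnd : ((List.range K).map (fun (i : Nat) => (i : Int))).Nodup :=
    (List.nodup_range).map (fun a b h => by exact_mod_cast h)
  have hnd : p.Nodup := hperm.nodup_iff.mpr hxsnd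
  have hnn : ∀ x ∈ p, 0 ≤ x := by
    intro x hx
    have := hperm.mem_iff.mp hx
    simp only [List.mem_map, List.mem_range] at this
    obtain ⟨i, _, hi⟩ := this
    omega
  have hmem : ∀ j : Nat, j < K → (j : Int) ∈ p := by
    intro j hj
    apply hperm.mem_iff.mpr
    simp only [List.mem_map, List.mem_range]
    exact ⟨j, hj, rfl⟩
  apply List.ext_getElem
  · rw [foldl_set_length]
    simp
  · intro j h1 h2
    have hjK : j < K := by
      rw [foldl_set_length] at h1
      simpa using h1
    rw [← List.getD_eq_getElem _ 0 h1,
      foldl_set_getD p hnd hnn 0 (List.replicate K 0) j (by simpa using hjK)]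
    cases hix : PySem.List.index? p (j : Int) with
    | none =>
        exfalso
        exact ((PySem.List.index?_eq_none_iff p (j : Int)).mp hix) (hmem j hjK)
    | some i =>
        rw [PySem.List.index?_eq_idxOf?] at hix
        simp [hix]

-- B's argsort row equals the same index?-table
theorem pa_row_alt (K : Nat) (p : List Int)
    (hp : p ∈ PySem.List.permutations ((List.range K).map (fun (i : Nat) => (i : Int))) K) :
    PySem.List.sorted (PySem.List.pyRange 0 (PySem.List.len p) 1)
        (fun i => PySem.List.pyGetD p i 0) false
      = (List.range K).map (fun (c : Nat) => (((PySem.List.index? p (c : Int)).getD 0 : Nat) : Int)) := by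
  have hlx : ((List.range K).map (fun (i : Nat) => (i : Int))).length = K := by simp
  have hperm : p.Perm ((List.range K).map (fun (i : Nat) => (i : Int))) := by
    apply PySem.List.perm_of_mem_permutations
    rwa [hlx]
  have hlen : p.length = K := by rw [hperm.length_eq, hlx]
  have hxsnd : ((List.range K).map (fun (i : Nat) => (i : Int))).Nodup :=
    (List.nodup_range).map (fun a b h => by exact_mod_cast h)
  have hnd : p.Nodup := hperm.nodup_iff.mpr hxsnd
  have hmem : ∀ c : Nat, c < K → (c : Int) ∈ p := by
    intro c hc
    apply hperm.mem_iff.mpr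
    simp only [List.mem_map, List.mem_range]
    exact ⟨c, hc, rfl⟩
  -- the index function and its characterisation
  set g : Nat → Int := fun c => (((PySem.List.index? p (c : Int)).getD 0 : Nat) : Int) with hg
  have hchar : ∀ c : Nat, c < K → ∃ (i : Nat) (hik : i < p.length),
      PySem.List.index? p (c : Int) = some i ∧ p[i] = (c : Int) := by
    intro c hc
    have : (PySem.List.index? p (c : Int)).isSome := by
      rw [PySem.List.index?_isSome_iff]
      exact hmem c hc
    obtain ⟨i, hi⟩ := Option.isSome_iff_exists.mp this
    obtain ⟨hik, hval, _⟩ := PySem.List.getElem_of_index?_eq_some hi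
    exact ⟨i, hik, hi, hval⟩
  have hkey : ∀ c : Nat, c < K → PySem.List.pyGetD p (g c) 0 = (c : Int) := by
    intro c hc
    obtain ⟨i, hik, hi, hval⟩ := hchar c hc
    rw [hg]
    simp only [hi, Option.getD_some, PySem.List.pyGetD_natCast]
    rw [List.getD_eq_getElem _ _ hik]
    exact hval
  have hrange : PySem.List.pyRange 0 (PySem.List.len p) 1 =
      (List.range K).map (fun (i : Nat) => (i : Int)) := by
    rw [PySem.List.len_eq, hlen]
    exact PySem.List.pyRange_zero_nat K
  rw [hrange]
  apply PySem.List.sorted_eq_of_perm_of_pairwise_lt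
  · -- permutation: the target list holds exactly the indices 0..K-1
    apply List.perm_of_nodup_nodup_toFinset_eq
    · apply List.Nodup.map_on _ List.nodup_range
      intro c1 h1 c2 h2 heq
      obtain ⟨i1, hik1, hi1, hval1⟩ := hchar c1 (List.mem_range.mp h1)
      obtain ⟨i2, hik2, hi2, hval2⟩ := hchar c2 (List.mem_range.mp h2)
      rw [hg] at heq
      simp only [hi1, hi2, Option.getD_some] at heq
      have : i1 = i2 := by exact_mod_cast heq
      subst this
      have : ((c1 : Nat) : Int) = ((c2 : Nat) : Int) := by
        rw [← hval1, ← hval2]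
      exact_mod_cast this
    · exact hxsnd
    · ext x
      simp only [List.mem_toFinset, List.mem_map, List.mem_range]
      constructor
      · rintro ⟨c, hc, rfl⟩
        obtain ⟨i, hik, hi, _⟩ := hchar c hc
        refine ⟨i, by omega, ?_⟩
        rw [PySem.List.index?_eq_idxOf?] at hi
        rw [hg]; simp [hi]
      · rintro ⟨i, hik, rfl⟩
        -- i is the index of the value p[i]
        have hik' : i < p.length := by omega
        have hmemp : p[i]'hik' ∈ p := List.getElem_mem _
        have : p[i]'hik' ∈ (List.range K).map (fun (i : Nat) => (i : Int)) :=
          hperm.mem_iff.mp hmemp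
        simp only [List.mem_map, List.mem_range] at this
        obtain ⟨c, hc, hval⟩ := this
        refine ⟨c, hc, ?_⟩
        obtain ⟨i', hik2, hi2, hval2⟩ := hchar c hc
        have hEq : i' = i := by
          have hii : p[i']'hik2 = p[i]'hik' := by rw [hval2, hval]
          exact (List.Nodup.getElem_inj_iff hnd).mp hii
        rw [PySem.List.index?_eq_idxOf?] at hi2
        rw [hg]
        simp [hi2, hEq]
  · -- strictly increasing keys
    rw [List.pairwise_map]
    apply List.Pairwise.imp_of_mem _ List.pairwise_lt_range
    intro a b ha hb hab
    rw [hkey a (List.mem_range.mp ha), hkey b (List.mem_range.mp hb)]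
    exact_mod_cast hab

theorem pa_lists_eq (K : Nat) :
    ((PySem.List.permutations ((List.range K).map (fun (i : Nat) => (i : Int))) K).map (fun p =>
      (PySem.List.enumerate p 0).foldl (fun acc pr => acc.set pr.2.toNat pr.1) (List.replicate K 0)))
    = ((PySem.List.permutations ((List.range K).map (fun (i : Nat) => (i : Int))) K).map (fun p =>
      PySem.List.sorted (PySem.List.pyRange 0 (PySem.List.len p) 1)
        (fun i => PySem.List.pyGetD p i 0) false)) := by
  apply List.map_congr_left
  intro p hp
  rw [pa_row K p hp, pa_row_alt K p hp]

theorem ports_eq (M K : Nat) (hM : 0 < M) : build_sa_py (M : Int) (K : Int) = build_sa_py_alt (M : Int) (K : Int) := by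
  unfold build_sa_py build_sa_py_alt
  simp only [Int.toNat_natCast]
  rw [fold_inv M hM K]
  refine congrArg₂ Prod.mk (by push_cast; ring) ?_
  refine congrArg₂ Prod.mk ?_ ?_
  · exact A_arc_eq M K hM
  · exact congrArg₂ Prod.mk (pa_lists_eq K) rfl

theorem ports_eq_small (m k : Int) (hk : 0 ≤ k) (hm : m ≤ 0)
    (hside : k = 0 ∨ m = 0 ∨ ¬ k % 2 = 0) :
    build_sa_py m k = build_sa_py_alt m k := by
  unfold build_sa_py build_sa_py_alt
  refine congrArg₂ Prod.mk ?_ ?_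
  · rw [fold_snd m k.toNat ([[]], 1)]; ring
  · refine congrArg₂ Prod.mk ?_ (congrArg₂ Prod.mk (pa_lists_eq k.toNat) rfl)
    by_cases h0 : k = 0
    · subst h0
      simp [pow_zero, PySem.List.pyRange_one_cons (show (0 : Int) < 1 by omega)]
    · have hK : 0 < k.toNat := by omega
      rw [fold_fst_nil m hm k.toNat hK]
      have hneg : m ^ k.toNat ≤ 0 := by
        by_cases hm0 : m = 0
        · subst hm0; rw [zero_pow (by omega)]
        · have hm' : m < 0 := by omega
          have hodd : ¬ k % 2 = 0 := by
            rcases hside with h | h | h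
            · omega
            · omega
            · exact h
          have hKodd : Odd k.toNat := by
            rcases Int.even_or_odd k with he | ho
            · exfalso; apply hodd; obtain ⟨r, hr⟩ := he; omega
            · obtain ⟨j, hj⟩ := ho
              exact ⟨j.toNat, by omega⟩
          exact le_of_lt (Odd.pow_neg hKodd hm')
      rw [PySem.List.pyRange_one_eq_nil (by omega)]
      rfl

-- ===== VERDICT (by name: the statement is the Claim_ definition above) =====
theorem build_sa_py_spec : Claim_unchanged_build_sa_py := by
  intro m k _ hpre hnd
  unfold Pre_build_sa_py at hpre
  by_cases hm : 0 < m
  · have h1 : m = ((m.toNat : Nat) : Int) := (Int.toNat_of_nonneg (by omega)).symm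
    have h2 : k = ((k.toNat : Nat) : Int) := (Int.toNat_of_nonneg hpre).symm
    rw [h1, h2]
    exact ports_eq m.toNat k.toNat (by omega)
  · apply ports_eq_small m k hpre (by omega)
    unfold D_build_sa_py at hnd
    by_cases h0 : k = 0
    · exact Or.inl h0
    · by_cases hm0 : m = 0
      · exact Or.inr (Or.inl hm0)
      · refine Or.inr (Or.inr ?_)
        intro he
        exact hnd ⟨by omega, by omega, he⟩

theorem build_sa_py_changed : Claim_changed_build_sa_py := by
  unfold Claim_changed_build_sa_py
  decide

theorem build_sa_py_tight : Claim_exact_build_sa_py := by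
  intro m k _ hpre hd
  obtain ⟨hm, hk, hev⟩ := hd
  intro heq
  have harc := congrArg (fun x => x.2.1.length) heq
  have hK : 0 < k.toNat := by omega
  have hKeven : Even k.toNat := by
    obtain ⟨r, hr⟩ := Int.even_iff.mpr hev
    exact ⟨r.toNat, by omega⟩
  have hpos : 0 < m ^ k.toNat := by
    have hne : m ≠ 0 := by omega
    exact hKeven.pow_pos hne
  unfold build_sa_py build_sa_py_alt at harc
  simp only [List.length_map] at harc
  rw [PySem.List.length_pyRange_one, fold_fst_nil m (by omega) k.toNat hK] at harc
  simp at harc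
  omega
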